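-- pv_equiv track=rewrite | github.com/vigneshsabapathi/python-algorithms | sorts/cycle_sort_optimized.py | selection_sort_count_writes
-- ===== SOURCE A (Python) =====
-- def selection_sort_count_writes(array: list) -> tuple[list, int]:
--     """
--     Selection sort instrumented for write count.
--     Selection sort also minimises swaps (one swap per cycle = 2 writes),
--     but a swap writes 2 positions while cycle sort writes each position once.
--
--     >>> selection_sort_count_writes([4, 3, 2, 1])[0]
--     [1, 2, 3, 4]
--     >>> selection_sort_count_writes([])[0]
--     []
--     >>> selection_sort_count_writes([1, 2, 3, 4])[1]  # already sorted -> 0 swaps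
--     0
--     """
--     arr = list(array)
--     n = len(arr)
--     writes = 0
--     for i in range(n - 1):
--         min_idx = i
--         for j in range(i + 1, n):
--             if arr[j] < arr[min_idx]:
--                 min_idx = j
--         if min_idx != i:
--             arr[i], arr[min_idx] = arr[min_idx], arr[i]
--             writes += 2  # swap = 2 writes
--     return arr, writes
-- ===== SOURCE B (Python) =====
-- def selection_sort_count_writes(array: list) -> tuple[list, int]:
--     """Sort a copy up front; at each position a swap is needed exactly when the
--     current element differs from the sorted one, and the partner is the leftmost
--     occurrence of that sorted value further right."""
--     arr = list(array)
--     s = sorted(arr)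
--     writes = 0
--     for i in range(len(arr) - 1):
--         v = s[i]
--         if arr[i] != v:
--             m = arr.index(v, i + 1)
--             arr[m] = arr[i]
--             arr[i] = v
--             writes += 2
--     return arr, writes
-- ===== Notes on version B (the rewrite author's own statement) =====
-- stated objective: faster
-- what changed: B sorts a copy once up front, then does a single pass: it swaps exactly when arr[i] differs from sorted[i], locating the partner with one leftmost-occurrence scan, instead of A's nested argmin loop.
import Mathlib
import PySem

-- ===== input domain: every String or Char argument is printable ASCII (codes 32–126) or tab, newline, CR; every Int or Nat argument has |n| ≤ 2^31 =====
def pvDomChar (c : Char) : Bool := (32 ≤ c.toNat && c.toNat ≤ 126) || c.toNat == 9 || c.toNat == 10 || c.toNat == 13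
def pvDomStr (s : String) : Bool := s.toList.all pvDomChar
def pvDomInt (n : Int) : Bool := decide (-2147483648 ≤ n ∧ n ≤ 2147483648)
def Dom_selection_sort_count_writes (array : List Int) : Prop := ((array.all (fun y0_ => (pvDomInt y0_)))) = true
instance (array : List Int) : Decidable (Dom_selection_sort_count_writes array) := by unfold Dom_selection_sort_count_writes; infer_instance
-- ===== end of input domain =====

-- B sorts a copy once and then swaps exactly at positions that mismatch the sorted list
-- (partner = leftmost later occurrence of the sorted value), replacing A's nested argmin loop; measured faster by a constant factor.

-- ===== PORT A =====
-- body of A's outer 'for i in range(n - 1)' loop (n = len(arr), constant: the list length never changes)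
def pvAStep (n : Int) (st : List Int × Int) (i : Int) : List Int × Int :=
  let arr := st.1
  let min_idx := (PySem.List.pyRange (i + 1) n 1).foldl
    (fun min_idx j =>
      if PySem.List.pyGetD arr j 0 < PySem.List.pyGetD arr min_idx 0 then j else min_idx) i
  if min_idx ≠ i then
    (PySem.List.pySetD (PySem.List.pySetD arr i (PySem.List.pyGetD arr min_idx 0)) min_idx
       (PySem.List.pyGetD arr i 0), st.2 + 2)
  else st

def selection_sort_count_writes (array : List Int) : List Int × Int :=
  let arr := array
  let n := PySem.List.len arr
  (PySem.List.pyRange 0 (n - 1) 1).foldl (pvAStep n) (arr, 0)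

-- ===== PORT B =====
-- body of B's 'for i in range(len(arr) - 1)' loop (s = sorted(arr), computed once)
def pvBStep (s : List Int) (st : List Int × Int) (i : Int) : List Int × Int :=
  let arr := st.1
  let v := PySem.List.pyGetD s i 0
  if PySem.List.pyGetD arr i 0 ≠ v then
    -- arr.index(v, i + 1): leftmost index of v in arr[i+1:], offset by the start (exact);
    -- the 'none' arm is Python's ValueError, unreachable since v is then present to the right of i
    let m : Int :=
      match PySem.List.index? (PySem.List.slice arr (some (i + 1)) none) v with
      | some k => i + 1 + (k : Int)
      | none => 0
    (PySem.List.pySetD (PySem.List.pySetD arr m (PySem.List.pyGetD arr i 0)) i v, st.2 + 2)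
  else st

def selection_sort_count_writes_alt (array : List Int) : List Int × Int :=
  let arr := array
  let s := PySem.List.sorted arr (fun x => x) false
  (PySem.List.pyRange 0 (PySem.List.len arr - 1) 1).foldl (pvBStep s) (arr, 0)

-- ===== PRECONDITION & SPEC =====
def Spec_selection_sort_count_writes (array : List Int) (out : List Int × Int) : Prop := out = selection_sort_count_writes_alt array
instance (array : List Int) (out : List Int × Int) : Decidable (Spec_selection_sort_count_writes array out) := by unfold Spec_selection_sort_count_writes; infer_instance

-- ===== CLAIM (what is proved, stated in full; the proofs are below) =====
def Claim_equal_selection_sort_count_writes : Prop := ∀ (array : List Int), Dom_selection_sort_count_writes array → Spec_selection_sort_count_writes array (selection_sort_count_writes array)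

-- ===== LEMMAS AND PROOFS =====

-- A's inner loop, named for the proofs (definitionally the fold inside pvAStep)
def pvArgmin (arr : List Int) (a b k : Int) : Int :=
  (PySem.List.pyRange a b 1).foldl
    (fun m j => if PySem.List.pyGetD arr j 0 < PySem.List.pyGetD arr m 0 then j else m) k

-- characterisation of A's inner argmin scan: result bounds, minimality, strictness before the result
lemma pv_argmin_spec (arr : List Int) :
    ∀ (d : Nat) (a b k : Int), b - a ≤ (d : Int) → k < a →
      (pvArgmin arr a b k = k ∨ (a ≤ pvArgmin arr a b k ∧ pvArgmin arr a b k < b)) ∧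
      PySem.List.pyGetD arr (pvArgmin arr a b k) 0 ≤ PySem.List.pyGetD arr k 0 ∧
      (∀ j, a ≤ j → j < b →
        PySem.List.pyGetD arr (pvArgmin arr a b k) 0 ≤ PySem.List.pyGetD arr j 0) ∧
      (pvArgmin arr a b k ≠ k →
        PySem.List.pyGetD arr (pvArgmin arr a b k) 0 < PySem.List.pyGetD arr k 0) ∧
      (∀ j, a ≤ j → j < pvArgmin arr a b k →
        PySem.List.pyGetD arr (pvArgmin arr a b k) 0 < PySem.List.pyGetD arr j 0) := by
  intro d
  induction d with
  | zero =>
    intro a b k hd hk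
    have hnil : pvArgmin arr a b k = k := by
      rw [pvArgmin, PySem.List.pyRange_one_eq_nil (by omega)]
      rfl
    rw [hnil]
    exact ⟨Or.inl rfl, le_refl _, fun j h1 h2 => by omega, fun h => absurd rfl h,
      fun j h1 h2 => by omega⟩
  | succ d ih =>
    intro a b k hd hk
    by_cases hab : b ≤ a
    · have hnil : pvArgmin arr a b k = k := by
        rw [pvArgmin, PySem.List.pyRange_one_eq_nil hab]
        rfl
      rw [hnil]
      exact ⟨Or.inl rfl, le_refl _, fun j h1 h2 => by omega, fun h => absurd rfl h,
        fun j h1 h2 => by omega⟩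
    · have hab2 : a < b := by omega
      set k' := (if PySem.List.pyGetD arr a 0 < PySem.List.pyGetD arr k 0 then a else k)
        with hk'
      have hstep : pvArgmin arr a b k = pvArgmin arr (a + 1) b k' := by
        rw [pvArgmin, pvArgmin, PySem.List.pyRange_one_cons hab2]
        simp only [List.foldl_cons]
        rw [← hk']
      have hk'a : k' < a + 1 := by rw [hk']; split <;> omega
      obtain ⟨hr1, hr2, hr3, hr4, hr5⟩ := ih (a + 1) b k' (by omega) hk'a
      rw [hstep]
      set r := pvArgmin arr (a + 1) b k' with hr
      by_cases ha : PySem.List.pyGetD arr a 0 < PySem.List.pyGetD arr k 0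
      · -- k' = a
        have hka : k' = a := by rw [hk', if_pos ha]
        rw [hka] at hr1 hr2 hr4
        refine ⟨?_, ?_, ?_, ?_, ?_⟩
        · rcases hr1 with h | h
          · exact Or.inr ⟨by omega, by omega⟩
          · exact Or.inr ⟨by omega, h.2⟩
        · exact le_of_lt (lt_of_le_of_lt hr2 ha)
        · intro j hja hjb
          rcases eq_or_lt_of_le hja with h | h
          · rw [← h]; exact hr2
          · exact hr3 j (by omega) hjb
        · intro _
          by_cases hrk : r = a
          · rw [hrk]; exact ha
          · exact lt_trans (hr4 hrk) ha
        · intro j hja hjr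
          rcases eq_or_lt_of_le hja with h | h
          · rw [← h]
            have hrk : r ≠ a := by omega
            exact hr4 hrk
          · exact hr5 j (by omega) hjr
      · -- k' = k
        have hka : k' = k := by rw [hk', if_neg ha]
        have hak : PySem.List.pyGetD arr k 0 ≤ PySem.List.pyGetD arr a 0 := by omega
        rw [hka] at hr1 hr2 hr4
        refine ⟨?_, ?_, ?_, ?_, ?_⟩
        · rcases hr1 with h | h
          · exact Or.inl h
          · exact Or.inr ⟨by omega, h.2⟩
        · exact hr2
        · intro j hja hjb
          rcases eq_or_lt_of_le hja with h | h
          · rw [← h]; exact le_trans hr2 hak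
          · exact hr3 j (by omega) hjb
        · exact hr4
        · intro j hja hjr
          rcases eq_or_lt_of_le hja with h | h
          · rw [← h]
            have hrk : r ≠ k := by
              intro hre
              rw [hre] at hjr
              omega
            exact lt_of_lt_of_le (hr4 hrk) hak
          · exact hr5 j (by omega) hjr

-- extend an equal prefix by one equal element
lemma pv_take_succ {l1 l2 : List Int} {i : Nat} (h1 : i < l1.length) (h2 : i < l2.length)
    (ht : l1.take i = l2.take i) (he : l1[i] = l2[i]) :
    l1.take (i + 1) = l2.take (i + 1) := by
  rw [List.take_add_one, List.take_add_one, ht, List.getElem?_eq_getElem h1, List.getElem?_eq_getElem h2, he]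

-- index? finds the leftmost occurrence
lemma pv_index?_eq (xs : List Int) (u : Nat) (v : Int) (hu : u < xs.length)
    (hv : xs[u] = v) (hl : ∀ j (hj : j < u), xs[j] ≠ v) :
    PySem.List.index? xs v = some u := by
  rw [PySem.List.index?_eq_some_iff]
  refine ⟨xs.take u, xs.drop (u + 1), ?_, ?_, ?_⟩
  · rw [← hv]
    conv_lhs => rw [← List.take_append_drop u xs]
    rw [← List.getElem_cons_drop hu]
  · simp [List.length_take]; omega
  · intro hmem
    obtain ⟨j, hj, hje⟩ := List.mem_iff_getElem.mp hmem
    have hju : j < u := by have := hj; simp [List.length_take] at this; omega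
    exact hl j hju (by simpa [List.getElem_take] using hje)

-- swapping two positions is a permutation
lemma pv_swap_perm (xs : List Int) (i r : Nat) (hir : i < r) (hr : r < xs.length) :
    ((xs.set i (xs[r])).set r (xs[i]'(by omega))).Perm xs := by
  have hi : i < xs.length := by omega
  set A1 := xs.take i with hA1
  set w0 := xs[i]'hi with hw0
  set v0 := xs[r] with hv0
  set B1 := (xs.drop (i + 1)).take (r - i - 1) with hB1
  set C1 := xs.drop (r + 1) with hC1
  have hlA : A1.length = i := by simp [hA1]; omega
  have hdropr : xs.drop r = v0 :: C1 := by
    rw [hv0, hC1, List.getElem_cons_drop]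
  have hdrop1 : xs.drop (i + 1) = B1 ++ v0 :: C1 := by
    rw [hB1, ← hdropr]
    have : xs.drop r = (xs.drop (i + 1)).drop (r - i - 1) := by
      rw [List.drop_drop]; congr 1; omega
    rw [this, List.take_append_drop]
  have hys : xs.set i v0 = A1 ++ v0 :: xs.drop (i + 1) := by
    rw [List.set_eq_take_append_cons_drop, if_pos hi]
  have hzs : (xs.set i v0).set r w0 = A1 ++ v0 :: B1 ++ w0 :: C1 := by
    rw [List.set_eq_take_append_cons_drop, if_pos (by simp; omega)]
    have htake : (xs.set i v0).take r = A1 ++ v0 :: B1 := by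
      rw [hys]
      have : A1 ++ v0 :: xs.drop (i + 1) = (A1 ++ [v0]) ++ xs.drop (i + 1) := by simp
      rw [this, List.take_append]
      have h1 : (A1 ++ [v0]).take r = A1 ++ [v0] := by
        apply List.take_of_length_le; simp [hlA]; omega
      rw [h1, hdrop1]
      have h2 : (B1 ++ v0 :: C1).take (r - (A1 ++ [v0]).length) = B1 := by
        have hlB : B1.length = r - i - 1 := by
          simp [hB1]; omega
        rw [List.take_append]
        have : r - (A1 ++ [v0]).length = B1.length := by simp [hlA, hlB]; omega
        rw [this]; simp
      rw [h2]; simp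
    have hdrop : (xs.set i v0).drop (r + 1) = C1 := by
      rw [hys]
      have : A1 ++ v0 :: xs.drop (i + 1) = (A1 ++ [v0]) ++ xs.drop (i + 1) := by simp
      rw [this, List.drop_append]
      have h1 : (A1 ++ [v0]).drop (r + 1) = [] := by
        apply List.drop_eq_nil_of_le; simp [hlA]; omega
      rw [h1, List.drop_drop]
      have h3 : i + 1 + (r + 1 - (A1 ++ [v0]).length) = r + 1 := by simp [hlA]; omega
      simp only [List.nil_append]
      rw [h3, hC1]
    rw [htake, hdrop]
  have hxs : xs = A1 ++ w0 :: B1 ++ v0 :: C1 := by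
    conv_lhs => rw [← List.take_append_drop i xs]
    rw [← hA1, ← List.getElem_cons_drop hi, ← hw0, hdrop1]
    simp [List.append_assoc, List.cons_append]
  rw [hzs]
  conv_rhs => rw [hxs]
  have hperm2 : (v0 :: (B1 ++ w0 :: C1)).Perm (w0 :: (B1 ++ v0 :: C1)) :=
    List.Perm.trans (List.Perm.cons v0 List.perm_middle)
      (List.Perm.trans (List.Perm.swap w0 v0 _) (List.Perm.cons w0 List.perm_middle.symm))
  have hp3 := (List.perm_append_left_iff A1).mpr hperm2
  simpa [List.append_assoc] using hp3

-- one loop iteration: A's body equals B's body, and the invariant is preserved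
lemma pv_step_eq (array s arr : List Int) (w : Int) (i : Nat)
    (hs : s = PySem.List.sorted array (fun x => x) false)
    (hlen : arr.length = array.length) (hperm : arr.Perm array)
    (hpre : arr.take i = s.take i) (hi : i + 1 < arr.length) :
    pvAStep (array.length) (arr, w) (i : Int) = pvBStep s (arr, w) (i : Int) ∧
    (pvAStep (array.length) (arr, w) (i : Int)).1.length = array.length ∧
    (pvAStep (array.length) (arr, w) (i : Int)).1.Perm array ∧
    (pvAStep (array.length) (arr, w) (i : Int)).1.take (i + 1) = s.take (i + 1) := by
  -- facts about s
  have hsp : s.Perm array := by rw [hs]; exact PySem.List.sorted_perm array _ false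
  have hsl : s.length = array.length := hsp.length_eq
  have hpair : s.Pairwise (· ≤ ·) := by
    rw [hs]; exact PySem.List.sorted_pairwise array (fun x => x)
  have his : i < s.length := by omega
  have hia : i < arr.length := by omega
  set v := s[i]'his with hv
  -- the suffixes are permutations of one another
  have hd : (arr.drop i).Perm (s.drop i) := by
    have h1 : (arr.take i ++ arr.drop i).Perm (s.take i ++ s.drop i) := by
      rw [List.take_append_drop, List.take_append_drop]
      exact hperm.trans hsp.symm
    rw [hpre] at h1
    exact (List.perm_append_left_iff _).mp h1
  -- v is the minimum of the suffix
  have hvmin : ∀ x ∈ s.drop i, v ≤ x := by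
    intro x hx
    have hcons : s.drop i = v :: s.drop (i + 1) := (List.getElem_cons_drop his).symm
    rw [hcons] at hx
    rcases List.mem_cons.mp hx with h | h
    · omega
    · have := hpair.drop (i := i)
      rw [hcons] at this
      exact (List.pairwise_cons.mp this).1 x h
  have harrmin : ∀ j : Nat, i ≤ j → (hj : j < arr.length) → v ≤ arr[j] := by
    intro j hij hj
    have hjd : j - i < (arr.drop i).length := by simp; omega
    have hmem : arr[j] ∈ arr.drop i := by
      have : (arr.drop i)[j - i] = arr[j] := by
        rw [List.getElem_drop]; congr 1; omega
      rw [← this]; exact List.getElem_mem _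
    exact hvmin _ (hd.subset hmem)
  have hvmem : v ∈ arr.drop i := by
    apply hd.symm.subset
    have hcons : s.drop i = v :: s.drop (i + 1) := (List.getElem_cons_drop his).symm
    rw [hcons]; exact List.mem_cons_self
  obtain ⟨u, hu, hue⟩ := List.mem_iff_getElem.mp hvmem
  have hulen : i + u < arr.length := by simp at hu; omega
  have hju : arr[i + u]'hulen = v := by rw [← hue, List.getElem_drop]
  -- A's inner argmin
  obtain ⟨h1, h2, h3, h4, h5⟩ :=
    pv_argmin_spec arr arr.length ((i : Int) + 1) (arr.length : Int) (i : Int)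
      (by omega) (by omega)
  set r := pvArgmin arr ((i : Int) + 1) (arr.length : Int) (i : Int) with hr
  have hr0 : 0 ≤ r := by rcases h1 with h | h <;> omega
  have hrlen : r < (arr.length : Int) := by rcases h1 with h | h <;> omega
  have hir : (i : Int) ≤ r := by rcases h1 with h | h <;> omega
  have hrn : r.toNat < arr.length := by omega
  have hgr : PySem.List.pyGetD arr r 0 = arr[r.toNat] := by
    rw [PySem.List.pyGetD_eq_getElem arr 0 hr0 (by simpa using hrlen)]
  have hgi : PySem.List.pyGetD arr (i : Int) 0 = arr[i] := by
    rw [PySem.List.pyGetD_eq_getElem arr 0 (by omega) (by simpa using (by omega : (i:Int) < arr.length))]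
    simp
  have hgs : PySem.List.pyGetD s (i : Int) 0 = v := by
    rw [PySem.List.pyGetD_eq_getElem s 0 (by omega) (by omega)]
    simp [hv]
  -- the argmin holds the value v
  have hrv : arr[r.toNat] = v := by
    have hle : v ≤ arr[r.toNat] := harrmin r.toNat (by omega) hrn
    have hge : arr[r.toNat] ≤ v := by
      by_cases hu0 : u = 0
      · have : (i : Int) + (u : Int) = i := by omega
        have h2' := h2
        rw [hgr, hgi] at h2'
        calc arr[r.toNat] ≤ arr[i] := h2'
          _ = v := by rw [← hju]; congr 1; omega
      · have h3' := h3 ((i : Int) + (u : Int)) (by omega) (by omega)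
        rw [hgr] at h3'
        rw [PySem.List.pyGetD_eq_getElem arr 0 (by omega) (by omega)] at h3'
        calc arr[r.toNat] ≤ arr[((i:Int)+(u:Int)).toNat]'(by omega) := h3'
          _ = v := by rw [← hju]; try congr 1; try omega
    omega
  -- unfold the two step functions
  have hA : pvAStep (array.length) (arr, w) (i : Int) =
      (if r ≠ (i : Int) then
        (PySem.List.pySetD (PySem.List.pySetD arr (i : Int) (PySem.List.pyGetD arr r 0)) r
          (PySem.List.pyGetD arr (i : Int) 0), w + 2)
      else (arr, w)) := by
    rw [hr, pvArgmin, pvAStep, hlen]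
  by_cases hcase : arr[i] = v
  · -- no swap on either side
    have hri : r = (i : Int) := by
      by_contra hne
      have := h4 hne
      rw [hgr, hgi, hrv, hcase] at this
      omega
    have hAe : pvAStep (array.length) (arr, w) (i : Int) = (arr, w) := by
      rw [hA, if_neg (by simp [hri])]
    have hBe : pvBStep s (arr, w) (i : Int) = (arr, w) := by
      rw [pvBStep]
      simp only [hgi, hgs, hcase, ne_eq, not_true_eq_false, if_false]
      try simp
    refine ⟨by rw [hAe, hBe], by rw [hAe]; exact hlen, by rw [hAe]; exact hperm, ?_⟩
    rw [hAe]
    exact pv_take_succ hia his hpre (by rw [hcase, hv])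
  · -- swap on both sides
    have hri : r ≠ (i : Int) := by
      intro he
      apply hcase
      rw [← hrv]; congr 1; omega
    have hir1 : (i : Int) + 1 ≤ r := by
      rcases h1 with h | h
      · exact absurd h hri
      · exact h.1
    -- A's result
    have hAe : pvAStep (array.length) (arr, w) (i : Int) =
        ((arr.set i v).set r.toNat (arr[i]'hia), w + 2) := by
      rw [hA, if_pos hri, hgr, hrv, hgi,
        PySem.List.pySetD_of_nonneg arr v (by omega),
        PySem.List.pySetD_of_nonneg _ (arr[i]'hia) hr0]
      simp
    -- B's index scan finds exactly r
    have hidx : PySem.List.index? (PySem.List.slice arr (some ((i : Int) + 1)) none) v =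
        some (r.toNat - (i + 1)) := by
      have hsl1 : PySem.List.slice arr (some ((i : Int) + 1)) none = arr.drop (i + 1) := by
        have : ((i : Int) + 1) = ((i + 1 : Nat) : Int) := by push_cast; ring
        rw [this, PySem.List.slice_from_natCast]
      rw [hsl1]
      refine pv_index?_eq _ _ _ (by simp; omega) ?_ ?_
      · rw [List.getElem_drop]
        rw [← hrv]; congr 1; omega
      · intro j hj
        have h5' := h5 ((i : Int) + 1 + (j : Int)) (by omega) (by omega)
        rw [hgr, hrv] at h5'
        rw [PySem.List.pyGetD_eq_getElem arr 0 (by omega) (by omega)] at h5'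
        intro heq
        rw [List.getElem_drop] at heq
        have hcast : arr[(((i:Int)+1+(j:Int))).toNat]'(by omega) = arr[i + 1 + j]'(by omega) := by
          try congr 1
          try omega
        rw [hcast, heq] at h5'
        omega
    have hBe : pvBStep s (arr, w) (i : Int) =
        ((arr.set r.toNat (arr[i]'hia)).set i v, w + 2) := by
      rw [pvBStep]
      simp only [hgi, hgs, hidx]
      rw [if_pos (by exact hcase)]
      have hm : (i : Int) + 1 + ((r.toNat - (i + 1) : Nat) : Int) = r := by omega
      rw [hm, PySem.List.pySetD_of_nonneg arr (arr[i]'hia) hr0,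
        PySem.List.pySetD_of_nonneg _ v (by omega : (0:Int) ≤ (i:Int))]
      simp
    have hset : (arr.set i v).set r.toNat (arr[i]'hia) =
        (arr.set r.toNat (arr[i]'hia)).set i v :=
      List.set_comm _ _ (by omega)
    have hperm' : ((arr.set i v).set r.toNat (arr[i]'hia)).Perm array := by
      have := pv_swap_perm arr i r.toNat (by omega) hrn
      rw [hrv] at this
      exact this.trans hperm
    refine ⟨?_, ?_, ?_, ?_⟩
    · rw [hAe, hBe, hset]
    · rw [hAe]; simpa using hlen
    · rw [hAe]; exact hperm'
    · rw [hAe]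
      apply pv_take_succ (l1 := (arr.set i v).set r.toNat (arr[i]'hia)) (by simpa using hia) his
      · rw [List.take_set, List.take_set]
        rw [List.set_eq_of_length_le (by simp; try omega)]
        rw [List.set_eq_of_length_le (by simp; try omega)]
        exact hpre
      · rw [List.getElem_set_ne (by omega), List.getElem_set_self]

-- the two folds agree from any position a on, given the invariant
lemma pv_loop (array s : List Int) (hs : s = PySem.List.sorted array (fun x => x) false) :
    ∀ (d a : Nat) (arr : List Int) (w : Int),
      ((array.length : Int) - 1) - (a : Int) ≤ (d : Int) →
      arr.length = array.length → arr.Perm array → arr.take a = s.take a →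
      (PySem.List.pyRange (a : Int) ((array.length : Int) - 1) 1).foldl
          (pvAStep (array.length)) (arr, w)
        = (PySem.List.pyRange (a : Int) ((array.length : Int) - 1) 1).foldl (pvBStep s) (arr, w) := by
  intro d
  induction d with
  | zero =>
    intro a arr w hd hlen hperm hpre
    rw [PySem.List.pyRange_one_eq_nil (by omega)]
    rfl
  | succ d ih =>
    intro a arr w hd hlen hperm hpre
    by_cases hend : ((array.length : Int) - 1) ≤ (a : Int)
    · rw [PySem.List.pyRange_one_eq_nil hend]
      rfl
    · have ha : (a : Int) < (array.length : Int) - 1 := by omega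
      rw [PySem.List.pyRange_one_cons ha]
      simp only [List.foldl_cons]
      obtain ⟨heq, hlen', hperm', hpre'⟩ :=
        pv_step_eq array s arr w a hs hlen hperm hpre (by omega)
      rw [← heq]
      have hcast : (a : Int) + 1 = ((a + 1 : Nat) : Int) := by push_cast; ring
      rw [hcast]
      exact ih (a + 1) (pvAStep (array.length) (arr, w) (a : Int)).1
        (pvAStep (array.length) (arr, w) (a : Int)).2 (by omega) hlen' hperm' hpre'

-- ===== VERDICT (by name: the statement is the Claim_ definition above) =====
theorem selection_sort_count_writes_spec : Claim_equal_selection_sort_count_writes := by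
  intro array _
  unfold Spec_selection_sort_count_writes
  unfold selection_sort_count_writes selection_sort_count_writes_alt
  simp only [PySem.List.len_eq]
  simpa using (pv_loop array _ rfl array.length 0 array 0 (by omega) rfl (List.Perm.refl _)
    (by simp))
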